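-- pv_equiv track=rewrite | github.com/rinleit/hackerrank-solutions | Interview Preparation Kit/Miscellaneous/Friend Circle Queries/solutions.py | maxCircle
-- ===== SOURCE A (Python) =====
-- def maxCircle(queries):
--     links  = {} # reference for which set they are in
--     length = {} # collection of the lengths
--     results = []
--     maxl = 2
--
--     def getroot(x):
--         while x != links[x]:
--             x = links[x]
--         return x
--
--     def init(x):
--         if x in links:
--             return getroot(x)
--         length[x] = 1
--         links[x] = x
--         return x
--
--     for a,b in queries:
--         a = init(a)
--         b = init(b)
--         if a != b:
--             if length[b]>length[a]: a,b=b,a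
--             links[b] = a
--             length[a] += length[b]
--             maxl = max(maxl,length[a])
--         results.append(maxl)
--     return results
-- ===== SOURCE B (Python) =====
-- def maxCircle(queries):
--     # Explicit-groups strategy: map each person to a group id and each group id
--     # to its member list; merge the smaller member list into the larger one.
--     gid = {}      # element -> id of its group (a representative element)
--     members = {}  # group id -> list of its members
--     results = []
--     maxl = 2
--     for a, b in queries:
--         if a not in gid:
--             gid[a] = a
--             members[a] = [a]
--         if b not in gid:
--             gid[b] = b
--             members[b] = [b]
--         ga, gb = gid[a], gid[b]
--         if ga != gb:
--             la, lb = members[ga], members[gb]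
--             if len(lb) > len(la):
--                 ga, la, lb = gb, lb, la
--             for x in lb:
--                 gid[x] = ga
--             merged = la + lb
--             members[ga] = merged
--             maxl = max(maxl, len(merged))
--         results.append(maxl)
--     return results
-- ===== Notes on version B (the rewrite author's own statement) =====
-- stated objective: alternative
-- what changed: Replaces the union-find parent-chain structure (getroot walks links pointers, lazy size dict) with explicit group bookkeeping: a dict element->group-id plus a dict group-id->member list, merging the smaller member list into the larger and relabelling its members, so no root-finding walk exists.
import Mathlib
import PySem

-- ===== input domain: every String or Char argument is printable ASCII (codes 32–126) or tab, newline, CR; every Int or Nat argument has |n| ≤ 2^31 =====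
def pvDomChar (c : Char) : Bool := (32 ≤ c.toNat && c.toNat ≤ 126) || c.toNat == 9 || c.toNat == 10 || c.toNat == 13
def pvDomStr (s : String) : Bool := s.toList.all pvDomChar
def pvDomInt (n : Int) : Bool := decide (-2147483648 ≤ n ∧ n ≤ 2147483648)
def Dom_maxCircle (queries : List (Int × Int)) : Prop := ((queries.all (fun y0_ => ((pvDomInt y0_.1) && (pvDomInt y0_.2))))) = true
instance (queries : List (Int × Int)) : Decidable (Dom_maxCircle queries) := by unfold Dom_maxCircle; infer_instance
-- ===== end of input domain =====

-- B replaces A's union-find parent chains by explicit group bookkeeping (element -> group id,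
-- group id -> member list, smaller list relabelled into the larger): an alternative data
-- structure of similar cost, proved to return the same list.

-- ===== PORT A =====
-- A's fold state: (links, length, maxl, results)
structure AState where
  links : PySem.Dict Int Int
  len   : PySem.Dict Int Int
  maxl  : Int
  res   : List Int

-- `while x != links[x]: x = links[x]` — fuel-guarded walk; fuel = number of keys always
-- suffices on the states A builds (proved below, chain_getroot), and links[x] is present
-- on every x the walk reaches, so neither guard changes the computed value.
def pvGetroot (links : PySem.Dict Int Int) : Nat → Int → Int
  | 0, x => x
  | n + 1, x =>
    match links.get? x with
    | some p => if x = p then x else pvGetroot links n p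
    | none => x   -- Python KeyError; unreachable on A's states

-- `init(x)`: returns (root, links, length) after the possible registration
def pvInitA (links len : PySem.Dict Int Int) (x : Int) :
    Int × PySem.Dict Int Int × PySem.Dict Int Int :=
  if links.contains x then (pvGetroot links links.size x, links, len)
  else (x, links.insert x x, len.insert x 1)

def pvStepA (st : AState) (q : Int × Int) : AState :=
  let i1 := pvInitA st.links st.len q.1
  let i2 := pvInitA i1.2.1 i1.2.2 q.2
  let a := i1.1
  let b := i2.1
  let links2 := i2.2.1
  let len2 := i2.2.2
  if a ≠ b then
    -- `if length[b] > length[a]: a, b = b, a`; getD 0 is a guard: both roots have entries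
    let p := if len2.getD b 0 > len2.getD a 0 then (b, a) else (a, b)
    let sa := len2.getD p.1 0 + len2.getD p.2 0
    let maxl' := max st.maxl sa
    ⟨links2.insert p.2 p.1, len2.insert p.1 sa, maxl', st.res ++ [maxl']⟩
  else ⟨links2, len2, st.maxl, st.res ++ [st.maxl]⟩

def maxCircle (queries : List (Int × Int)) : List Int :=
  (queries.foldl pvStepA ⟨PySem.Dict.empty, PySem.Dict.empty, 2, []⟩).res

-- ===== PORT B =====
-- B's fold state: (gid, members, maxl, results)
structure BState where
  gid  : PySem.Dict Int Int
  mem  : PySem.Dict Int (List Int)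
  maxl : Int
  res  : List Int

-- `if x not in gid: gid[x] = x; members[x] = [x]`
def pvRegB (s : BState) (x : Int) : BState :=
  if s.gid.contains x then s
  else { s with gid := s.gid.insert x x, mem := s.mem.insert x [x] }

def pvStepB (s0 : BState) (q : Int × Int) : BState :=
  let s := pvRegB (pvRegB s0 q.1) q.2
  let ga := s.gid.getD q.1 0   -- present after registration; getD is a guard only
  let gb := s.gid.getD q.2 0
  if ga ≠ gb then
    let la := s.mem.getD ga []
    let lb := s.mem.getD gb []
    -- `if len(lb) > len(la): ga, la, lb = gb, lb, la`
    let p := if lb.length > la.length then (gb, lb, la) else (ga, la, lb)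
    let gid' := p.2.2.foldl (fun d x => d.insert x p.1) s.gid
    let merged := p.2.1 ++ p.2.2
    ⟨gid', s.mem.insert p.1 merged, max s.maxl (merged.length : Int),
      s.res ++ [max s.maxl (merged.length : Int)]⟩
  else { s with res := s.res ++ [s.maxl] }

def maxCircle_alt (queries : List (Int × Int)) : List Int :=
  (queries.foldl pvStepB ⟨PySem.Dict.empty, PySem.Dict.empty, 2, []⟩).res

-- ===== PRECONDITION & SPEC =====
def Spec_maxCircle (queries : List (Int × Int)) (out : List Int) : Prop := out = maxCircle_alt queries
instance (queries : List (Int × Int)) (out : List Int) : Decidable (Spec_maxCircle queries out) := by unfold Spec_maxCircle; infer_instance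

-- ===== CLAIM (what is proved, stated in full; the proofs are below) =====
def Claim_equal_maxCircle : Prop := ∀ (queries : List (Int × Int)), Dom_maxCircle queries → Spec_maxCircle queries (maxCircle queries)

-- ===== LEMMAS AND PROOFS =====

-- `Chain links x r d`: following parent pointers from x reaches the self-linked root r in d steps
inductive Chain (links : PySem.Dict Int Int) : Int → Int → Nat → Prop
  | self {r} : links.get? r = some r → Chain links r r 0
  | step {x p r d} : links.get? x = some p → x ≠ p → Chain links p r d → Chain links x r (d + 1)

-- the coupling invariant between A's state (links, len) and B's state (gid, mem)
def CInv (links len gid : PySem.Dict Int Int) (mem : PySem.Dict Int (List Int)) : Prop :=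
  gid.keys.Nodup ∧ links.keys.Nodup ∧
  (∀ x, links.contains x = gid.contains x) ∧
  (∀ x p, links.get? x = some p → gid.get? p = gid.get? x) ∧
  (∀ x r, gid.get? x = some r → gid.get? r = some r) ∧
  (∀ r, gid.get? r = some r →
    ∃ l, mem.get? r = some l ∧ l.Nodup ∧ (∀ y, y ∈ l ↔ gid.get? y = some r) ∧
      len.get? r = some (l.length : Int) ∧ links.get? r = some r) ∧
  (∀ x r, gid.get? x = some r → ∃ d, Chain links x r d ∧ d + 1 ≤ ((mem.get? r).getD []).length)

theorem get?_some_of_contains {κ ν : Type} [BEq κ] (d : PySem.Dict κ ν) (k : κ)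
    (h : d.contains k = true) : ∃ v, d.get? k = some v := by
  rw [PySem.Dict.contains_eq_isSome_get?] at h
  exact Option.isSome_iff_exists.mp h

theorem get?_none_of_not_contains {κ ν : Type} [BEq κ] [LawfulBEq κ] (d : PySem.Dict κ ν) (k : κ)
    (h : d.contains k = false) : d.get? k = none := by
  rw [PySem.Dict.get?_eq_none_iff_contains]; exact h

theorem chain_getroot {links : PySem.Dict Int Int} {x r : Int} {d fuel : Nat}
    (h : Chain links x r d) (hf : d ≤ fuel) : pvGetroot links fuel x = r := by
  induction h generalizing fuel with
  | self hr =>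
    cases fuel with
    | zero => rfl
    | succ n => simp [pvGetroot, hr]
  | step hx hne _ ih =>
    cases fuel with
    | zero => omega
    | succ n =>
      simp only [pvGetroot, hx, if_neg hne]
      exact ih (by omega)

theorem chain_insert_fresh {links : PySem.Dict Int Int} {x r v w : Int} {d : Nat}
    (hv : links.get? v = none) (h : Chain links x r d) : Chain (links.insert v w) x r d := by
  induction h with
  | self hr =>
    exact Chain.self (by rw [PySem.Dict.get?_insert_of_ne _ _ (by intro e; rw [e, hv] at hr; cases hr)]; exact hr)
  | step hx hne hch ih =>
    exact Chain.step (by rw [PySem.Dict.get?_insert_of_ne _ _ (by intro e; rw [e, hv] at hx; cases hx)]; exact hx) hne ih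

-- a chain whose start lies in a group other than v's is untouched by an insert at v
theorem chain_insert_away {links gid : PySem.Dict Int Int} {y g r v w : Int} {d : Nat}
    (H7 : ∀ x p, links.get? x = some p → gid.get? p = gid.get? x)
    (hy : gid.get? y = some g) (hgv : gid.get? v ≠ some g)
    (h : Chain links y r d) : Chain (links.insert v w) y r d := by
  induction h with
  | @self r hr =>
    have hne : r ≠ v := by intro e; rw [← e] at hgv; exact hgv hy
    exact Chain.self (by rw [PySem.Dict.get?_insert_of_ne _ _ hne]; exact hr)
  | @step x p r d hx hne hch ih =>
    have hxv : x ≠ v := by intro e; rw [← e] at hgv; exact hgv hy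
    have hp : gid.get? p = some g := by rw [H7 x p hx]; exact hy
    exact Chain.step (by rw [PySem.Dict.get?_insert_of_ne _ _ hxv]; exact hx) hne (ih hp)

-- a chain ending at root v becomes, after links[v] := w, a chain to the root w (one longer)
theorem chain_redirect {links gid : PySem.Dict Int Int} {y v w : Int} {d : Nat}
    (H7 : ∀ x p, links.get? x = some p → gid.get? p = gid.get? x)
    (hy : gid.get? y = some v) (hv : links.get? v = some v) (hvw : v ≠ w)
    (hw : links.get? w = some w)
    (h : Chain links y v d) : Chain (links.insert v w) y w (d + 1) := by
  induction h with
  | @self r hr =>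
    exact Chain.step (PySem.Dict.get?_insert_self _ _ _) hvw
      (Chain.self (by rw [PySem.Dict.get?_insert_of_ne _ _ (Ne.symm hvw)]; exact hw))
  | @step x p r d hx hne hch ih =>
    have hxv : x ≠ r := by
      intro e
      have hpr : p = r := by rw [e] at hx; rw [hv] at hx; exact (Option.some_inj.mp hx).symm
      rw [e, hpr] at hne; exact hne rfl
    have hp : gid.get? p = some r := by rw [H7 x p hx]; exact hy
    exact Chain.step (by rw [PySem.Dict.get?_insert_of_ne _ _ hxv]; exact hx) hne (ih hp hv hvw)

-- foldl of constant-value inserts: lookup is `if ∈ list then the constant else old`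
theorem get?_foldl_insert_const {l : List Int} {d : PySem.Dict Int Int} {g y : Int} :
    (l.foldl (fun d x => d.insert x g) d).get? y = if y ∈ l then some g else d.get? y := by
  induction l generalizing d with
  | nil => simp
  | cons z t ih =>
    simp only [List.foldl_cons, ih, List.mem_cons]
    by_cases hyt : y ∈ t
    · simp [hyt]
    · by_cases hyz : y = z
      · simp [hyz, PySem.Dict.get?_insert_self]
      · simp [hyt, hyz, PySem.Dict.get?_insert_of_ne _ _ hyz]

theorem contains_foldl_insert_const {l : List Int} {d : PySem.Dict Int Int} {g y : Int}
    (hl : ∀ x ∈ l, d.contains x = true) :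
    (l.foldl (fun d x => d.insert x g) d).contains y = d.contains y := by
  rw [PySem.Dict.contains_eq_isSome_get?, PySem.Dict.contains_eq_isSome_get?,
    get?_foldl_insert_const]
  by_cases hy : y ∈ l
  · simp only [hy, if_pos, Option.isSome_some]
    have := hl y hy
    rw [PySem.Dict.contains_eq_isSome_get?] at this
    exact this.symm
  · simp [hy]

theorem nodup_subset_length_le {l l' : List Int} (h : l.Nodup) (hs : l ⊆ l') :
    l.length ≤ l'.length := by
  classical
  calc l.length = l.toFinset.card := (List.toFinset_card_of_nodup h).symm
  _ ≤ l'.toFinset.card := Finset.card_le_card (by intro a ha; simp only [List.mem_toFinset] at *; exact hs ha)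
  _ ≤ l'.length := l'.toFinset_card_le

theorem sizes_eq {links gid : PySem.Dict Int Int}
    (h1 : gid.keys.Nodup) (h2 : links.keys.Nodup)
    (h3 : ∀ x, links.contains x = gid.contains x) : links.size = gid.size := by
  have hp : links.keys.Perm gid.keys := by
    rw [List.perm_ext_iff_of_nodup h2 h1]
    intro a
    constructor
    · intro ha
      rw [← PySem.Dict.contains_iff_mem_keys] at ha ⊢
      rw [← h3]; exact ha
    · intro ha
      rw [← PySem.Dict.contains_iff_mem_keys] at ha ⊢
      rw [h3]; exact ha
  have hk : links.keys.length = gid.keys.length := hp.length_eq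
  simpa [PySem.Dict.size, PySem.Dict.keys] using hk

-- registering a fresh element preserves the invariant
theorem CInv_insert_fresh {links len gid : PySem.Dict Int Int} {mem : PySem.Dict Int (List Int)}
    {x : Int} (hI : CInv links len gid mem) (hx : gid.contains x = false) :
    CInv (links.insert x x) (len.insert x 1) (gid.insert x x) (mem.insert x [x]) := by
  obtain ⟨h1, h2, h3, h7, h4, h5, h6⟩ := hI
  have hgx : gid.get? x = none := get?_none_of_not_contains _ _ hx
  have hlx : links.get? x = none := get?_none_of_not_contains _ _ (by rw [h3]; exact hx)
  refine ⟨PySem.Dict.nodup_keys_insert _ _ _ h1, PySem.Dict.nodup_keys_insert _ _ _ h2, ?_, ?_, ?_, ?_, ?_⟩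
  · intro y
    rw [PySem.Dict.contains_insert, PySem.Dict.contains_insert, h3]
  · intro y p hyp
    by_cases hyx : y = x
    · rw [hyx, PySem.Dict.get?_insert_self] at hyp
      rw [hyx, ← Option.some_inj.mp hyp]
    · rw [PySem.Dict.get?_insert_of_ne _ _ hyx] at hyp
      have hpx : p ≠ x := by
        intro e
        have := h7 y p hyp
        rw [e, hgx] at this
        obtain ⟨r, hr⟩ := get?_some_of_contains gid y (by rw [← h3, PySem.Dict.contains_eq_isSome_get?, hyp]; rfl)
        rw [hr] at this; cases this
      rw [PySem.Dict.get?_insert_of_ne _ _ hpx, PySem.Dict.get?_insert_of_ne _ _ hyx]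
      exact h7 y p hyp
  · intro y r hyr
    by_cases hyx : y = x
    · rw [hyx, PySem.Dict.get?_insert_self] at hyr
      rw [← Option.some_inj.mp hyr, PySem.Dict.get?_insert_self]
    · rw [PySem.Dict.get?_insert_of_ne _ _ hyx] at hyr
      have hrx : r ≠ x := by
        intro e; rw [e] at hyr
        have := h4 y x hyr; rw [hgx] at this; cases this
      rw [PySem.Dict.get?_insert_of_ne _ _ hrx]
      exact h4 y r hyr
  · intro r hr
    by_cases hrx : r = x
    · rw [hrx]
      refine ⟨[x], PySem.Dict.get?_insert_self _ _ _, List.nodup_singleton x, ?_, ?_, PySem.Dict.get?_insert_self _ _ _⟩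
      · intro y
        by_cases hyx : y = x
        · rw [hyx]; simp [PySem.Dict.get?_insert_self]
        · simp only [List.mem_singleton, hyx, false_iff]
          rw [PySem.Dict.get?_insert_of_ne _ _ hyx]
          intro hc
          have := h4 y x hc; rw [hgx] at this; cases this
      · rw [PySem.Dict.get?_insert_self]; rfl
    · rw [PySem.Dict.get?_insert_of_ne _ _ hrx] at hr
      obtain ⟨l, hml, hnd, hchar, hlen, hlk⟩ := h5 r hr
      refine ⟨l, by rw [PySem.Dict.get?_insert_of_ne _ _ hrx]; exact hml, hnd, ?_,
        by rw [PySem.Dict.get?_insert_of_ne _ _ hrx]; exact hlen,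
        by rw [PySem.Dict.get?_insert_of_ne _ _ hrx]; exact hlk⟩
      intro y
      by_cases hyx : y = x
      · rw [hyx, PySem.Dict.get?_insert_self]
        constructor
        · intro hc
          have := (hchar x).mp hc
          rw [hgx] at this; cases this
        · intro hc; exact absurd (Option.some_inj.mp hc) (Ne.symm hrx)
      · rw [PySem.Dict.get?_insert_of_ne _ _ hyx]; exact hchar y
  · intro y r hyr
    by_cases hyx : y = x
    · rw [hyx, PySem.Dict.get?_insert_self] at hyr
      rw [← Option.some_inj.mp hyr, hyx]
      exact ⟨0, Chain.self (PySem.Dict.get?_insert_self _ _ _), by simp [PySem.Dict.get?_insert_self]⟩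
    · rw [PySem.Dict.get?_insert_of_ne _ _ hyx] at hyr
      obtain ⟨d, hch, hb⟩ := h6 y r hyr
      have hrx : r ≠ x := by
        intro e; rw [e] at hyr
        have := h4 y x hyr; rw [hgx] at this; cases this
      exact ⟨d, chain_insert_fresh hlx hch, by rw [PySem.Dict.get?_insert_of_ne _ _ hrx]; exact hb⟩

-- merging group v (member list lv) into group w (member list lw)
theorem CInv_merge {links len gid : PySem.Dict Int Int} {mem : PySem.Dict Int (List Int)}
    {w v : Int} {lw lv : List Int} (hI : CInv links len gid mem)
    (hw : gid.get? w = some w) (hv : gid.get? v = some v) (hne : w ≠ v)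
    (hmw : mem.get? w = some lw) (hmv : mem.get? v = some lv) :
    CInv (links.insert v w) (len.insert w ((lw.length : Int) + (lv.length : Int)))
      (lv.foldl (fun d x => d.insert x w) gid) (mem.insert w (lw ++ lv)) := by
  obtain ⟨h1, h2, h3, h7, h4, h5, h6⟩ := hI
  obtain ⟨lw', hmw', hndw, hcharw, hlenw, hlkw⟩ := h5 w hw
  obtain ⟨lv', hmv', hndv, hcharv, hlenv, hlkv⟩ := h5 v hv
  rw [hmw'] at hmw; rw [hmv'] at hmv
  obtain rfl : lw = lw' := (Option.some_inj.mp hmw).symm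
  obtain rfl : lv = lv' := (Option.some_inj.mp hmv).symm
  have hwlv : w ∉ lv := by
    intro hc; rw [(hcharv w).mp hc] at hw; exact hne (Option.some_inj.mp hw).symm
  have hvlv : v ∈ lv := (hcharv v).mpr hv
  have hwlw : w ∈ lw := (hcharw w).mpr hw
  have hg' : ∀ y, (lv.foldl (fun d x => d.insert x w) gid).get? y =
      if y ∈ lv then some w else gid.get? y := fun y => get?_foldl_insert_const
  refine ⟨?_, PySem.Dict.nodup_keys_insert _ _ _ h2, ?_, ?_, ?_, ?_, ?_⟩
  · exact PySem.Dict.nodup_keys_foldl_insert lv (fun _ _ => w) gid h1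
  · intro y
    rw [contains_foldl_insert_const (fun x hx => by
      rw [PySem.Dict.contains_eq_isSome_get?, (hcharv x).mp hx]; rfl)]
    rw [PySem.Dict.contains_insert, h3]
    by_cases hyv : y = v
    · subst hyv
      simp [PySem.Dict.contains_eq_isSome_get?, hv]
    · simp [show (y == v) = false by simp [hyv]]
  · intro y p hyp
    by_cases hyv : y = v
    · rw [hyv, PySem.Dict.get?_insert_self] at hyp
      have hwp : w = p := Option.some_inj.mp hyp
      rw [hyv, ← hwp, hg' w, hg' v, if_neg hwlv, if_pos hvlv, hw]
    · rw [PySem.Dict.get?_insert_of_ne _ _ hyv] at hyp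
      have hpg := h7 y p hyp
      rw [hg' p, hg' y]
      by_cases hylv : y ∈ lv
      · have hplv : p ∈ lv := (hcharv p).mpr (by rw [hpg]; exact (hcharv y).mp hylv)
        rw [if_pos hplv, if_pos hylv]
      · have hplv : p ∉ lv := by
          intro hc
          exact hylv ((hcharv y).mpr (by rw [← hpg]; exact (hcharv p).mp hc))
        rw [if_neg hplv, if_neg hylv]; exact hpg
  · intro y r hyr
    rw [hg' y] at hyr
    rw [hg' r]
    by_cases hylv : y ∈ lv
    · rw [if_pos hylv] at hyr
      obtain rfl : r = w := (Option.some_inj.mp hyr).symm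
      rw [if_neg hwlv]; exact hw
    · rw [if_neg hylv] at hyr
      have hr := h4 y r hyr
      have hrlv : r ∉ lv := by
        intro hc
        have e1 := (hcharv r).mp hc
        have e2 : r = v := Option.some_inj.mp (hr.symm.trans e1)
        rw [e2] at hyr
        exact hylv ((hcharv y).mpr hyr)
      rw [if_neg hrlv]; exact hr
  · intro r hr
    rw [hg' r] at hr
    by_cases hrlv : r ∈ lv
    · rw [if_pos hrlv] at hr
      obtain rfl : r = w := (Option.some_inj.mp hr).symm
      exact absurd hrlv hwlv
    · rw [if_neg hrlv] at hr
      by_cases hrw : r = w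
      · subst hrw
        refine ⟨lw ++ lv, PySem.Dict.get?_insert_self _ _ _, ?_, ?_, ?_, ?_⟩
        · refine List.Nodup.append hndw hndv ?_
          intro a haw hav
          have := (hcharw a).mp haw
          rw [(hcharv a).mp hav] at this
          exact hne (Option.some_inj.mp this).symm
        · intro y
          rw [hg' y, List.mem_append]
          by_cases hylv : y ∈ lv
          · simp [hylv]
          · simp only [hylv, or_false]
            exact hcharw y
        · rw [PySem.Dict.get?_insert_self]
          congr 1
          push_cast [List.length_append]
          ring
        · rw [PySem.Dict.get?_insert_of_ne _ _ hne]; exact hlkw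
      · obtain ⟨l, hml, hnd, hchar, hlen, hlk⟩ := h5 r hr
        have hrv : r ≠ v := by
          intro e; subst e; exact hrlv hvlv
        refine ⟨l, by rw [PySem.Dict.get?_insert_of_ne _ _ hrw]; exact hml, hnd, ?_,
          by rw [PySem.Dict.get?_insert_of_ne _ _ hrw]; exact hlen,
          by rw [PySem.Dict.get?_insert_of_ne _ _ hrv]; exact hlk⟩
        intro y
        rw [hg' y]
        by_cases hylv : y ∈ lv
        · rw [if_pos hylv]
          constructor
          · intro hc
            have e1 := (hchar y).mp hc
            have e2 := (hcharv y).mp hylv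
            rw [e1] at e2
            exact absurd (Option.some_inj.mp e2) hrv
          · intro hc; exact absurd (Option.some_inj.mp hc).symm hrw
        · rw [if_neg hylv]; exact hchar y
  · intro y r hyr
    rw [hg' y] at hyr
    by_cases hylv : y ∈ lv
    · rw [if_pos hylv] at hyr
      obtain rfl : r = w := (Option.some_inj.mp hyr).symm
      obtain ⟨d, hch, hb⟩ := h6 y v ((hcharv y).mp hylv)
      rw [hmv'] at hb
      refine ⟨d + 1, chain_redirect h7 ((hcharv y).mp hylv) hlkv (Ne.symm hne) hlkw hch, ?_⟩
      rw [PySem.Dict.get?_insert_self]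
      simp only [Option.getD_some, List.length_append]
      have hlw1 : 1 ≤ lw.length := List.length_pos_of_mem hwlw
      simp only [Option.getD_some] at hb
      omega
    · rw [if_neg hylv] at hyr
      have hyg := hyr
      obtain ⟨d, hch, hb⟩ := h6 y r hyr
      have hrv : gid.get? v ≠ some r := by
        intro hc
        obtain rfl : v = r := Option.some_inj.mp (hv.symm.trans hc)
        exact hylv ((hcharv y).mpr hyg)
      refine ⟨d, chain_insert_away h7 hyg hrv hch, ?_⟩
      by_cases hrw : r = w
      · subst hrw
        rw [PySem.Dict.get?_insert_self]
        rw [hmw'] at hb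
        simp only [Option.getD_some, List.length_append] at *
        omega
      · rw [PySem.Dict.get?_insert_of_ne _ _ hrw]; exact hb

theorem CInv_empty : CInv PySem.Dict.empty PySem.Dict.empty PySem.Dict.empty
    (PySem.Dict.empty : PySem.Dict Int (List Int)) := by
  refine ⟨?_, ?_, ?_, ?_, ?_, ?_, ?_⟩ <;>
    simp [PySem.Dict.get?_empty]

theorem mem_keys_of_get?_some {gid : PySem.Dict Int Int} {y r : Int}
    (h : gid.get? y = some r) : y ∈ gid.keys := by
  rw [← PySem.Dict.contains_iff_mem_keys, PySem.Dict.contains_eq_isSome_get?, h]; rfl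

-- the fuel `links.size` always suffices for the root walk
theorem getroot_eq {links len gid : PySem.Dict Int Int} {mem : PySem.Dict Int (List Int)}
    {x r : Int} (hI : CInv links len gid mem) (hr : gid.get? x = some r) :
    pvGetroot links links.size x = r := by
  obtain ⟨h1, h2, h3, h7, h4, h5, h6⟩ := hI
  obtain ⟨d, hch, hb⟩ := h6 x r hr
  obtain ⟨l, hml, hnd, hchar, hlen, hlk⟩ := h5 r (h4 x r hr)
  rw [hml] at hb
  simp only [Option.getD_some] at hb
  have hsub : l ⊆ gid.keys := fun y hy => mem_keys_of_get?_some ((hchar y).mp hy)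
  have hle : l.length ≤ gid.keys.length := nodup_subset_length_le hnd hsub
  have hsz : links.size = gid.keys.length := by
    rw [sizes_eq h1 h2 h3]; simp [PySem.Dict.size, PySem.Dict.keys]
  exact chain_getroot hch (by omega)

-- registration couples pvInitA with pvRegB
theorem reg_couple {links len : PySem.Dict Int Int} {s : BState} {x : Int}
    (hI : CInv links len s.gid s.mem) :
    CInv (pvInitA links len x).2.1 (pvInitA links len x).2.2 (pvRegB s x).gid (pvRegB s x).mem ∧
      (pvRegB s x).gid.get? x = some (pvInitA links len x).1 ∧
      (pvRegB s x).maxl = s.maxl ∧ (pvRegB s x).res = s.res := by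
  have h3 := hI.2.2.1
  by_cases hc : s.gid.contains x = true
  · have hlc : links.contains x = true := by rw [h3]; exact hc
    obtain ⟨r, hr⟩ := get?_some_of_contains _ _ hc
    simp only [pvInitA, pvRegB, hlc, hc, if_true]
    exact ⟨hI, by rw [hr, getroot_eq hI hr], trivial, trivial⟩
  · simp only [Bool.not_eq_true] at hc
    have hlc : links.contains x = false := by rw [h3]; exact hc
    simp only [pvInitA, pvRegB, hlc, hc, Bool.false_eq_true, if_false]
    exact ⟨CInv_insert_fresh hI hc, PySem.Dict.get?_insert_self _ _ _, trivial, trivial⟩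

theorem reg_preserves {s : BState} {x y r : Int} (h : s.gid.get? y = some r) :
    (pvRegB s x).gid.get? y = some r := by
  unfold pvRegB
  by_cases hc : s.gid.contains x = true
  · simp only [hc, if_true]; exact h
  · simp only [Bool.not_eq_true] at hc
    simp only [hc, Bool.false_eq_true, if_false]
    have hyx : y ≠ x := by
      intro e; rw [e, get?_none_of_not_contains _ _ hc] at h; cases h
    rw [PySem.Dict.get?_insert_of_ne _ _ hyx]; exact h

theorem step_couple {st : AState} {s : BState} (q : Int × Int)
    (hI : CInv st.links st.len s.gid s.mem)
    (hm : st.maxl = s.maxl) (hr : st.res = s.res) :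
    CInv (pvStepA st q).links (pvStepA st q).len (pvStepB s q).gid (pvStepB s q).mem ∧
      (pvStepA st q).maxl = (pvStepB s q).maxl ∧ (pvStepA st q).res = (pvStepB s q).res := by
  obtain ⟨hI1, hg1, hm1, hr1⟩ := reg_couple (s := s) (x := q.1) hI
  obtain ⟨hI2, hg2, hm2, hr2⟩ := reg_couple (s := pvRegB s q.1) (x := q.2) hI1
  have hg1' : (pvRegB (pvRegB s q.1) q.2).gid.get? q.1 = some (pvInitA st.links st.len q.1).1 :=
    reg_preserves hg1
  set i1 := pvInitA st.links st.len q.1 with hi1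
  set i2 := pvInitA i1.2.1 i1.2.2 q.2 with hi2
  set s2 := pvRegB (pvRegB s q.1) q.2 with hs2
  have hga : s2.gid.getD q.1 0 = i1.1 := PySem.Dict.getD_of_get?_eq_some _ _ hg1'
  have hgb : s2.gid.getD q.2 0 = i2.1 := PySem.Dict.getD_of_get?_eq_some _ _ hg2
  have hmm : st.maxl = s2.maxl := by rw [hm, ← hm1, ← hm2]
  have hrr : st.res = s2.res := by rw [hr, ← hr1, ← hr2]
  simp only [pvStepA, pvStepB, ← hi1, ← hi2, ← hs2, hga, hgb]
  by_cases hne : i1.1 ≠ i2.1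
  case neg =>
    simp only [hne, if_false]
    exact ⟨hI2, hmm, by rw [hrr, hmm]⟩
  case pos =>
    simp only [if_pos hne]
    -- root facts
    have hra : s2.gid.get? i1.1 = some i1.1 := hI2.2.2.2.2.1 q.1 i1.1 hg1'
    have hrb : s2.gid.get? i2.1 = some i2.1 := hI2.2.2.2.2.1 q.2 i2.1 hg2
    obtain ⟨la, hmla, hnda, hchara, hlena, hlka⟩ := hI2.2.2.2.2.2.1 i1.1 hra
    obtain ⟨lb, hmlb, hndb, hcharb, hlenb, hlkb⟩ := hI2.2.2.2.2.2.1 i2.1 hrb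
    have hda : s2.mem.getD i1.1 [] = la := PySem.Dict.getD_of_get?_eq_some _ _ hmla
    have hdb : s2.mem.getD i2.1 [] = lb := PySem.Dict.getD_of_get?_eq_some _ _ hmlb
    have hla : i2.2.2.getD i1.1 0 = (la.length : Int) := PySem.Dict.getD_of_get?_eq_some _ _ hlena
    have hlb : i2.2.2.getD i2.1 0 = (lb.length : Int) := PySem.Dict.getD_of_get?_eq_some _ _ hlenb
    simp only [hla, hlb, hda, hdb, gt_iff_lt, Nat.cast_lt]
    by_cases hsz : la.length < lb.length
    · simp only [if_pos hsz]
      rw [hla, hlb]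
      have hm' := CInv_merge hI2 hrb hra (Ne.symm hne) hmlb hmla
      refine ⟨hm', ?_, ?_⟩
      · simp only [hmm]
        congr 1
        push_cast [List.length_append]
        ring
      · rw [hrr, hmm]
        congr 2
        push_cast [List.length_append]
        ring
    · simp only [if_neg hsz]
      rw [hla, hlb]
      have hm' := CInv_merge hI2 hra hrb hne hmla hmlb
      refine ⟨hm', ?_, ?_⟩
      · simp only [hmm]
        congr 1
        push_cast [List.length_append]
        ring
      · rw [hrr, hmm]
        congr 2
        push_cast [List.length_append]
        ring

theorem fold_couple (qs : List (Int × Int)) :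
    ∀ (st : AState) (s : BState), CInv st.links st.len s.gid s.mem →
      st.maxl = s.maxl → st.res = s.res →
      (qs.foldl pvStepA st).res = (qs.foldl pvStepB s).res := by
  induction qs with
  | nil => intro st s _ _ hr; exact hr
  | cons q t ih =>
    intro st s hI hm hr
    obtain ⟨hI', hm', hr'⟩ := step_couple q hI hm hr
    exact ih _ _ hI' hm' hr'

-- ===== VERDICT (by name: the statement is the Claim_ definition above) =====
theorem maxCircle_spec : Claim_equal_maxCircle := by
  intro queries _
  unfold Spec_maxCircle maxCircle maxCircle_alt
  exact fold_couple queries _ _ CInv_empty rfl rfl
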